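-- pv_equiv track=rewrite | github.com/habinrahman/microdegree-outreach-platform | backend/app/services/hr_whitelist_cleanup.py | parse_keep_lines
-- ===== SOURCE A (Python) =====
-- from typing import Iterable
--
-- def parse_keep_lines(lines: Iterable[str]) -> list[str]:
--     out: list[str] = []
--     for line in lines:
--         s = line.strip()
--         if not s or s.startswith("#"):
--             continue
--         out.append(s)
--     return list(dict.fromkeys(out))
-- ===== SOURCE B (Python) =====
-- def parse_keep_lines(lines):
--     pending = [s for s in (line.strip() for line in lines) if s and not s.startswith("#")]
--     out = []
--     while pending:
--         s = pending[0]
--         out.append(s)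
--         pending = [r for r in pending[1:] if r != s]
--     return out
-- ===== Notes on version B (the rewrite author's own statement) =====
-- stated objective: alternative
-- what changed: B replaces A's dict.fromkeys hashed deduplication with nub-by-deletion: after stripping/filtering, it repeatedly takes the head of the worklist and deletes all its later occurrences, so no dict/set is used at all (O(n*d) removals instead of O(n) hashing).
import Mathlib
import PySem

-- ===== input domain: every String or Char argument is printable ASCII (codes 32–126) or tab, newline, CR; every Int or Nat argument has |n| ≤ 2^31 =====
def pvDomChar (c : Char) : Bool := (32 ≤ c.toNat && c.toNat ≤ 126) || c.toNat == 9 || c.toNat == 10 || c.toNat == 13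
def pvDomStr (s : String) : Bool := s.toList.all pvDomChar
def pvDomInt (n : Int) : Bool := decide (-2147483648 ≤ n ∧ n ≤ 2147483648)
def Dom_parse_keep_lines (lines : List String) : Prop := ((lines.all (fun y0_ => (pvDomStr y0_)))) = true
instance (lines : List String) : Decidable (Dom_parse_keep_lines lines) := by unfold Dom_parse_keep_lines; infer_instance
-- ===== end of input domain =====

-- B dedupes by repeated removal (nub-by-deletion) instead of A's hashed dict.fromkeys: no set/dict at all (objective: alternative; not faster).

-- ===== PORT A =====
-- loop body of A's for-loop
def pvStepA (out : List String) (line : String) : List String :=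
  let s := PySem.Str.strip line
  if s == "" || PySem.Str.startswith s "#" then out else out ++ [s]

def parse_keep_lines (lines : List String) : List String :=
  PySem.List.dedup (lines.foldl pvStepA [])

-- ===== PORT B =====
-- the while loop of B: take the head, drop all its later occurrences, recurse
def pvNub : List String → List String
  | [] => []
  | s :: rest => s :: pvNub (rest.filter (fun r => r != s))
termination_by l => l.length
decreasing_by simpa using Nat.lt_succ_of_le (List.length_filter_le _ _)

def parse_keep_lines_alt (lines : List String) : List String :=
  pvNub ((lines.map PySem.Str.strip).filter
    (fun s => !(s == "") && !(PySem.Str.startswith s "#")))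

-- ===== PRECONDITION & SPEC =====
def Spec_parse_keep_lines (lines : List String) (out : List String) : Prop := out = parse_keep_lines_alt lines
instance (lines : List String) (out : List String) : Decidable (Spec_parse_keep_lines lines out) := by unfold Spec_parse_keep_lines; infer_instance

-- ===== CLAIM (what is proved, stated in full; the proofs are below) =====
def Claim_equal_parse_keep_lines : Prop := ∀ (lines : List String), Dom_parse_keep_lines lines → Spec_parse_keep_lines lines (parse_keep_lines lines)

-- ===== LEMMAS AND PROOFS =====

def pvKeep (s : String) : Bool := !(s == "") && !(PySem.Str.startswith s "#")

lemma pvStepA_eq (out : List String) (line : String) :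
    pvStepA out line =
      if pvKeep (PySem.Str.strip line) then out ++ [PySem.Str.strip line] else out := by
  unfold pvStepA pvKeep
  cases h1 : (PySem.Str.strip line == "") <;>
    cases h2 : PySem.Str.startswith (PySem.Str.strip line) "#" <;>
      simp_all

lemma pvA_loop (lines : List String) (acc : List String) :
    lines.foldl pvStepA acc
      = acc ++ ((lines.map PySem.Str.strip).filter pvKeep) := by
  induction lines generalizing acc with
  | nil => simp
  | cons l ls ih =>
    rw [List.foldl_cons, pvStepA_eq]
    by_cases hk : pvKeep (PySem.Str.strip l) = true
    · rw [if_pos hk, ih]; simp [hk]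
    · rw [if_neg hk, ih]; simp [Bool.eq_false_iff.mpr hk]

-- dedup (first occurrences) commutes with filtering
lemma pvOfList_filter (p : String → Bool) (xs : List String) :
    PySem.Set.ofList (xs.filter p) = (PySem.Set.ofList xs).filter p := by
  induction xs with
  | nil => rfl
  | cons x xs ih =>
    by_cases hp : p x = true
    · rw [List.filter_cons_of_pos hp, PySem.Set.ofList_cons, PySem.Set.ofList_cons,
        List.filter_cons_of_pos hp]
      unfold PySem.Set.discard
      rw [ih, List.filter_comm]
    · rw [List.filter_cons_of_neg (by simp [hp]), PySem.Set.ofList_cons,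
        List.filter_cons_of_neg (by simp [hp]), ih]
      unfold PySem.Set.discard
      rw [List.filter_filter]
      refine List.filter_congr ?_
      intro y _
      by_cases hyx : y = x
      · subst hyx; simp [hp]
      · simp [hyx]

-- nub-by-deletion computes the same first-occurrence dedup
lemma pvNub_eq (xs : List String) : pvNub xs = PySem.Set.ofList xs := by
  have h : ∀ (n : Nat) (ys : List String), ys.length ≤ n → pvNub ys = PySem.Set.ofList ys := by
    intro n
    induction n with
    | zero =>
      intro ys hy
      have : ys = [] := List.eq_nil_of_length_eq_zero (Nat.le_zero.mp hy)
      subst this; rw [pvNub]; rfl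
    | succ n ih =>
      intro ys hy
      match ys with
      | [] => rw [pvNub]; rfl
      | s :: rest =>
        rw [pvNub, PySem.Set.ofList_cons,
          ih _ (Nat.le_trans (List.length_filter_le _ _) (Nat.succ_le_succ_iff.mp hy)),
          pvOfList_filter]
        unfold PySem.Set.discard
        rfl
  exact h xs.length xs (Nat.le_refl _)

-- ===== VERDICT (by name: the statement is the Claim_ definition above) =====
theorem parse_keep_lines_spec : Claim_equal_parse_keep_lines := by
  intro lines _
  unfold Spec_parse_keep_lines parse_keep_lines parse_keep_lines_alt
  rw [pvA_loop, pvNub_eq, PySem.List.dedup]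
  rfl
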